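-- pv_equiv track=rewrite | github.com/sergiobrr/esercizio | main.py | get_min_number
-- ===== SOURCE A (Python) =====
-- MIN_VALUE = -100000
--
-- MAX_VALUE = 100000
--
-- class InvalidValue(ValueError):
--     """Exception raised for errors in the array members.
--
--     Attributes:
--         value -- array member which caused the error
--         index -- member's index
--     """
--
--     def __init__(
--             self, value, index
--     ):
--         """
--         Args:
--             value: the invalid value
--             index: invalid value list position
--         """
--         self.value = value
--         self.index = index
--         self.message = f'''Value "{value}" at position\
--  {index} is not an integer between 100000 and -100000'''
--         super().__init__(self.message)
--
-- def get_min_number(array):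
--     """ Returns the min int which opposite is present into the list
--         or zero if conditions aren't matched
--
--     Args:
--         array: list
--
--     Returns:
--         num: int
--     """
--     positivi = []
--     negativi = set()
--     for x in array:
--         if type(x) == int and 0 >= x >= MIN_VALUE:
--             negativi.add(x)
--         elif type(x) == int and 0 < x <= MAX_VALUE:
--             positivi.append(x)
--         else:
--             raise InvalidValue(x, array.index(x))
--
--     positivi.sort(reverse=True)
--
--     while positivi:
--         num = positivi.pop()
--         if -num in negativi:
--             return num
--
--     return 0
-- ===== SOURCE B (Python) =====
-- MIN_VALUE = -100000
--
-- MAX_VALUE = 100000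
--
-- class InvalidValue(ValueError):
--     def __init__(self, value, index):
--         self.value = value
--         self.index = index
--         self.message = f'''Value "{value}" at position\
--  {index} is not an integer between 100000 and -100000'''
--         super().__init__(self.message)
--
-- def get_min_number(array):
--     """No sort: collect positives and non-positives into sets, then take the
--     min of the positives whose negation occurs (0 if none)."""
--     pos = set()
--     neg = set()
--     for x in array:
--         if type(x) == int and 0 >= x >= MIN_VALUE:
--             neg.add(x)
--         elif type(x) == int and 0 < x <= MAX_VALUE:
--             pos.add(x)
--         else:
--             raise InvalidValue(x, array.index(x))
--     common = {n for n in pos if -n in neg}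
--     return min(common) if common else 0
-- ===== Notes on version B (the rewrite author's own statement) =====
-- stated objective: idiomatic
-- what changed: Replaces A's sort-descending-then-pop-and-scan over a positives list with two sets built in one pass and a direct min over the positives whose negation occurs (0 if none); the validating loop and its InvalidValue raise are kept identical.
import Mathlib
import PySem

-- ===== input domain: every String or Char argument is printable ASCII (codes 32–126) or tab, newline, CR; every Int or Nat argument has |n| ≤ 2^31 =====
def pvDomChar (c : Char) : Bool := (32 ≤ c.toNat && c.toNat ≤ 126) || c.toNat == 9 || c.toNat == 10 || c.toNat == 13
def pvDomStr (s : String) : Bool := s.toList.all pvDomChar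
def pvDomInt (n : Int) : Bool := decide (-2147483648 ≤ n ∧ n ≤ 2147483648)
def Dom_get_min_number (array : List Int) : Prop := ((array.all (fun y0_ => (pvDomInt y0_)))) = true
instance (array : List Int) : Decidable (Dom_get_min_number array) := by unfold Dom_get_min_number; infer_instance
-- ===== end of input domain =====

-- B replaces A's sort-descending/pop-and-scan with two sets and a min over the
-- matching positives (idiomatic; same validation/raising behaviour).

-- ===== PORT A =====
-- the while-positivi/pop() loop: pop() takes the LAST element, so it walks the
-- reversed list; transliterated as head recursion on positivi.reverse
def popLoopA : List Int → PySem.Set Int → Int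
  | [], _ => 0
  | num :: rest, negativi =>
      if PySem.Set.contains negativi (-num) then num else popLoopA rest negativi

def get_min_number (array : List Int) : Int :=
  -- the else branch raises InvalidValue (excluded by Pre_); the port leaves the state unchanged there
  let st := array.foldl
    (fun (acc : List Int × PySem.Set Int) x =>
      if 0 ≥ x ∧ x ≥ -100000 then (acc.1, PySem.Set.add acc.2 x)
      else if 0 < x ∧ x ≤ 100000 then (acc.1 ++ [x], acc.2)
      else acc)
    ([], PySem.Set.empty)
  let positivi := PySem.List.sorted st.1 (fun y => y) true
  popLoopA positivi.reverse st.2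

-- ===== PORT B =====
def get_min_number_alt (array : List Int) : Int :=
  -- the else branch raises InvalidValue (excluded by Pre_); the port leaves the state unchanged there
  let st := array.foldl
    (fun (acc : PySem.Set Int × PySem.Set Int) x =>
      if 0 ≥ x ∧ x ≥ -100000 then (acc.1, PySem.Set.add acc.2 x)
      else if 0 < x ∧ x ≤ 100000 then (PySem.Set.add acc.1 x, acc.2)
      else acc)
    (PySem.Set.empty, PySem.Set.empty)
  let common := st.1.filter (fun n => PySem.Set.contains st.2 (-n))
  (PySem.List.min? common (fun y => y)).getD 0

-- ===== PRECONDITION & SPEC =====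
-- Pre_ excludes exactly the inputs containing an out-of-range element, on which
-- the Python A raises InvalidValue
def Pre_get_min_number (array : List Int) : Prop :=
  ∀ x ∈ array, -100000 ≤ x ∧ x ≤ 100000
instance (array : List Int) : Decidable (Pre_get_min_number array) := by
  unfold Pre_get_min_number; infer_instance

def pvWitness_get_min_number : List Int := [3, -1, 1, 0, -3]

def Spec_get_min_number (array : List Int) (out : Int) : Prop := out = get_min_number_alt array
instance (array : List Int) (out : Int) : Decidable (Spec_get_min_number array out) := by unfold Spec_get_min_number; infer_instance

-- ===== CLAIM (what is proved, stated in full; the proofs are below) =====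
def Claim_equal_get_min_number : Prop := ∀ (array : List Int), Dom_get_min_number array → Pre_get_min_number array → Spec_get_min_number array (get_min_number array)

-- ===== LEMMAS AND PROOFS =====

-- A's pop-and-scan is find? on the reversed (ascending) list, defaulted to 0
theorem popLoopA_eq_find? (l : List Int) (N : PySem.Set Int) :
    popLoopA l N = (l.find? (fun num => PySem.Set.contains N (-num))).getD 0 := by
  induction l with
  | nil => rfl
  | cons a t ih =>
    by_cases h : (-a) ∈ N
    · simp [popLoopA, List.find?, h]
    · simp [popLoopA, List.find?, h, ih]

-- on a ≤-sorted list, find? returns an element that is minimal among matches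
theorem find?_sorted_min {p : Int → Bool} {l : List Int} {a : Int}
    (hp : l.Pairwise (· ≤ ·)) (h : l.find? p = some a) :
    p a = true ∧ a ∈ l ∧ ∀ x ∈ l, p x = true → a ≤ x := by
  induction l with
  | nil => simp at h
  | cons b t ih =>
    rcases List.pairwise_cons.mp hp with ⟨hb, ht⟩
    by_cases hpb : p b = true
    · simp only [List.find?, hpb] at h
      injection h with h; subst h
      refine ⟨hpb, List.mem_cons_self, ?_⟩
      intro x hx _
      rcases List.mem_cons.mp hx with rfl | hx
      · exact le_refl _
      · exact hb x hx
    · simp only [Bool.not_eq_true] at hpb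
      simp only [List.find?, hpb] at h
      rcases ih ht h with ⟨h1, h2, h3⟩
      refine ⟨h1, List.mem_cons_of_mem _ h2, ?_⟩
      intro x hx hpx
      rcases List.mem_cons.mp hx with rfl | hx
      · rw [hpx] at hpb; cases hpb
      · exact h3 x hx hpx

-- the two folds run in lockstep: B's pos set is A's positivi list deduplicated
theorem fold_AB (arr : List Int) (pl : List Int) (ns : PySem.Set Int) :
    arr.foldl
      (fun (acc : PySem.Set Int × PySem.Set Int) x =>
        if 0 ≥ x ∧ x ≥ -100000 then (acc.1, PySem.Set.add acc.2 x)
        else if 0 < x ∧ x ≤ 100000 then (PySem.Set.add acc.1 x, acc.2)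
        else acc)
      (PySem.Set.ofList pl, ns)
    = ((PySem.Set.ofList (arr.foldl
        (fun (acc : List Int × PySem.Set Int) x =>
          if 0 ≥ x ∧ x ≥ -100000 then (acc.1, PySem.Set.add acc.2 x)
          else if 0 < x ∧ x ≤ 100000 then (acc.1 ++ [x], acc.2)
          else acc)
        (pl, ns)).1),
       (arr.foldl
        (fun (acc : List Int × PySem.Set Int) x =>
          if 0 ≥ x ∧ x ≥ -100000 then (acc.1, PySem.Set.add acc.2 x)
          else if 0 < x ∧ x ≤ 100000 then (acc.1 ++ [x], acc.2)
          else acc)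
        (pl, ns)).2) := by
  induction arr generalizing pl ns with
  | nil => rfl
  | cons x t ih =>
    simp only [List.foldl]
    by_cases h1 : 0 ≥ x ∧ x ≥ -100000
    · simp only [h1]
      exact ih pl (PySem.Set.add ns x)
    · simp only [h1, if_neg, not_false_iff]
      by_cases h2 : 0 < x ∧ x ≤ 100000
      · simp only [h2]
        have : PySem.Set.add (PySem.Set.ofList pl) x = PySem.Set.ofList (pl ++ [x]) := by
          rw [PySem.Set.ofList_eq_foldl, PySem.Set.ofList_eq_foldl, List.foldl_append]
          rfl
        rw [this]
        exact ih (pl ++ [x]) ns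
      · simp only [h2, if_neg, not_false_iff]
        exact ih pl ns

-- ===== VERDICT (by name: the statement is the Claim_ definition above) =====
theorem get_min_number_spec : Claim_equal_get_min_number := by
  intro array _ _
  unfold Spec_get_min_number get_min_number get_min_number_alt
  simp only []
  -- name the common fold result of A
  set fA := fun (acc : List Int × PySem.Set Int) x =>
      if 0 ≥ x ∧ x ≥ -100000 then (acc.1, PySem.Set.add acc.2 x)
      else if 0 < x ∧ x ≤ 100000 then (acc.1 ++ [x], acc.2)
      else acc with hfA
  set P := (array.foldl fA ([], PySem.Set.empty)).1 with hP
  set N := (array.foldl fA ([], PySem.Set.empty)).2 with hN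
  have hB := fold_AB array [] PySem.Set.empty
  rw [show (PySem.Set.ofList ([] : List Int)) = PySem.Set.empty from rfl] at hB
  rw [hB]
  set p := fun n : Int => PySem.Set.contains N (-n) with hp
  -- A's side: find? on the ascending list
  rw [popLoopA_eq_find?]
  set l := (PySem.List.sorted P (fun y => y) true).reverse with hl
  have hpair : l.Pairwise (· ≤ ·) := by
    rw [hl, List.pairwise_reverse]
    exact PySem.List.sorted_pairwise_rev P (fun y => y)
  have hmem : ∀ x : Int, x ∈ l ↔ x ∈ P := by
    intro x
    rw [hl, List.mem_reverse, PySem.List.mem_sorted]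
  have hmemS : ∀ x : Int, x ∈ PySem.Set.ofList P ↔ x ∈ P := by
    intro x; exact PySem.Set.mem_ofList P x
  -- compare the two sides
  cases hfind : l.find? p with
  | none =>
    have hno : ∀ x ∈ l, ¬ p x = true := by
      intro x hx
      exact List.find?_eq_none.mp hfind x hx
    have hfilter : (PySem.Set.ofList P).filter (fun n => p n) = [] := by
      apply List.filter_eq_nil_iff.mpr
      intro x hx
      exact hno x ((hmem x).mpr ((hmemS x).mp hx))
    rw [hfilter]
    rfl
  | some a =>
    rcases find?_sorted_min hpair hfind with ⟨hpa, haL, hamin⟩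
    have haP : a ∈ PySem.Set.ofList P := (hmemS a).mpr ((hmem a).mp haL)
    have haF : a ∈ (PySem.Set.ofList P).filter (fun n => p n) :=
      List.mem_filter.mpr ⟨haP, hpa⟩
    cases hmin : PySem.List.min? ((PySem.Set.ofList P).filter (fun n => p n)) (fun y => y) with
    | none =>
      have := (PySem.List.min?_eq_none_iff _ _).mp hmin
      rw [this] at haF
      cases haF
    | some m =>
      have hmF := PySem.List.min?_mem hmin
      have hmMin := PySem.List.min?_isMin hmin
      rcases List.mem_filter.mp hmF with ⟨hmP, hpm⟩
      have h1 : m ≤ a := hmMin a haF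
      have h2 : a ≤ m := hamin m ((hmem m).mpr ((hmemS m).mp hmP)) hpm
      have : a = m := le_antisymm h2 h1
      simp [this]
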